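-- pv_equiv track=rewrite | github.com/vitorloures/Competitive_programming | increasing_substring.py | get_increasing_substring
-- ===== SOURCE A (Python) =====
-- def get_increasing_substring(strlen: int, string: str) -> str:
--     last_letter_number = ord(string[0])
--     inc_str = '1 '
--     last_inc_size = 1
--     for i in range(1, strlen):
--         cur_letter_number = ord(string[i])
--         if cur_letter_number > last_letter_number:
--             last_inc_size += 1
--             inc_str += str(last_inc_size) + ' '
--         else:
--             inc_str += '1 '
--             last_inc_size = 1
--
--         last_letter_number = cur_letter_number
--     return inc_str
-- ===== SOURCE B (Python) =====
-- def get_increasing_substring(strlen: int, string: str) -> str: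
--     # scan run by run: the inner loop finds where the current increasing run
--     # ends, then the labels 1..k for that run are emitted in one go.
--     parts = []
--     i = 0
--     while True:
--         j = i + 1
--         while j < strlen and ord(string[j]) > ord(string[j - 1]):
--             j += 1
--         parts.extend(range(1, j - i + 1))
--         i = j
--         if i >= strlen:
--             break
--     return ' '.join(map(str, parts)) + ' '
-- ===== Notes on version B (the rewrite author's own statement) =====
-- stated objective: alternative
-- what changed: A makes one pass with a running counter, deciding and concatenating one label per character; B scans run by run with a nested loop (an inner scan finds where the current increasing run ends, then the run's labels 1..k are emitted in one go via range) and joins once at the end.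
import Mathlib
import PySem

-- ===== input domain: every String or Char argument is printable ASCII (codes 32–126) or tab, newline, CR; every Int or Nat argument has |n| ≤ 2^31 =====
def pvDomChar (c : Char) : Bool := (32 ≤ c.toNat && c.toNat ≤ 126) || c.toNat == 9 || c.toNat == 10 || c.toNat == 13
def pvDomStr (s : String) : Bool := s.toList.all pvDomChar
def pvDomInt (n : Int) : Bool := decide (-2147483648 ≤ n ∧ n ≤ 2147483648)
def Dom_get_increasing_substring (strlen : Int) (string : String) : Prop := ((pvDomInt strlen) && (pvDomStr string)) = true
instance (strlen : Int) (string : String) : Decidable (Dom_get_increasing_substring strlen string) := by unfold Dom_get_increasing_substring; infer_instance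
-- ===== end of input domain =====

-- B scans the input run by run with a nested loop (an inner scan finds the end of the
-- current increasing run, whose labels 1..k are then emitted in one go), instead of A's
-- single loop with a running counter and string concatenation ('alternative'; same cost).


-- ===== PORT A =====
-- loop body of A: state = (last_letter_number, inc_str, last_inc_size)
def pvAStep (cs : List Char) (st : Int × List Char × Int) (i : Int) : Int × List Char × Int :=
  let cur : Int := ((PySem.List.pyGet? cs i).getD ' ').toNat   -- ord(string[i]); IndexError excluded by Pre_
  if cur > st.1 then (cur, st.2.1 ++ PySem.Int.toChars (st.2.2 + 1) ++ [' '], st.2.2 + 1)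
  else (cur, st.2.1 ++ ['1', ' '], 1)

def get_increasing_substring (strlen : Int) (string : String) : String :=
  let cs := string.toList
  String.ofList (((PySem.List.pyRange 1 strlen 1).foldl (pvAStep cs)
    ((((PySem.List.pyGet? cs 0).getD ' ').toNat : Int), ['1', ' '], 1)).2.1)

-- ===== PORT B =====
-- ord(string[i])
def pvOrd (cs : List Char) (i : Int) : Int := ((PySem.List.pyGet? cs i).getD ' ').toNat

-- inner while loop of B, structural on a fuel that bounds the remaining positions
-- (fuel = (strlen - j).toNat, so the loop condition is false whenever fuel runs out)
def pvScanGo (cs : List Char) (strlen : Int) : Nat → Int → Int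
  | 0, j => j
  | fuel + 1, j =>
    if j < strlen ∧ pvOrd cs j > pvOrd cs (j - 1) then pvScanGo cs strlen fuel (j + 1) else j

-- advance j while it is inside the current increasing run
def pvScan (cs : List Char) (strlen j : Int) : Int := pvScanGo cs strlen (strlen - j).toNat j

-- outer do-while loop of B, one iteration per run (fuel bounds the remaining iterations;
-- the fuel-0 case is the final iteration, reachable only when the loop breaks at once):
-- emits the current run's labels 1..k, then continues from the run's end
def pvRunsGo (cs : List Char) (strlen : Int) : Nat → Int → List Int → List Int
  | 0, i, parts => parts ++ PySem.List.pyRange 1 (pvScan cs strlen (i + 1) - i + 1) 1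
  | fuel + 1, i, parts =>
    let j := pvScan cs strlen (i + 1)
    let parts' := parts ++ PySem.List.pyRange 1 (j - i + 1) 1
    if j ≥ strlen then parts' else pvRunsGo cs strlen fuel j parts'

def get_increasing_substring_alt (strlen : Int) (string : String) : String :=
  let cs := string.toList
  let parts := pvRunsGo cs strlen strlen.toNat 0 []
  String.ofList (PySem.Chars.join [' '] (parts.map PySem.Int.toChars) ++ [' '])

-- ===== PRECONDITION & SPEC =====
-- A raises IndexError on the empty string (string[0]) and whenever strlen exceeds len(string).
def Pre_get_increasing_substring (strlen : Int) (string : String) : Prop :=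
  string.toList ≠ [] ∧ strlen ≤ (string.toList.length : Int)
instance (strlen : Int) (string : String) : Decidable (Pre_get_increasing_substring strlen string) := by
  unfold Pre_get_increasing_substring; infer_instance
def pvWitness_get_increasing_substring : Int × String := (4, "abca")

def Spec_get_increasing_substring (strlen : Int) (string : String) (out : String) : Prop := out = get_increasing_substring_alt strlen string
instance (strlen : Int) (string : String) (out : String) : Decidable (Spec_get_increasing_substring strlen string out) := by unfold Spec_get_increasing_substring; infer_instance

-- ===== CLAIM (what is proved, stated in full; the proofs are below) =====
def Claim_equal_get_increasing_substring : Prop := ∀ (strlen : Int) (string : String), Dom_get_increasing_substring strlen string → Pre_get_increasing_substring strlen string → Spec_get_increasing_substring strlen string (get_increasing_substring strlen string)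

-- ===== LEMMAS AND PROOFS =====

-- proof-side reference recurrence: the list of run-length labels, one comparison at a time
def pvCmp (cs : List Char) (i : Int) : Bool :=
  decide ((((PySem.List.pyGet? cs i).getD ' ').toNat : Int) > (((PySem.List.pyGet? cs (i - 1)).getD ' ').toNat : Int))

def pvLStep (ls : List Int) (inc : Bool) : List Int :=
  ls ++ [if inc then ((PySem.List.pyGet? ls (-1)).getD 1) + 1 else 1]

-- proof-side segment accumulator: state = (labels so far, start of current run)
def pvSegStep (st : List Int × Int) (e : Int) : List Int × Int :=
  (st.1 ++ PySem.List.pyRange 1 (e - st.2 + 1) 1, e)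

def pvStartsFold (cs : List Char) (m : Int) : List Int × Int :=
  (((PySem.List.pyRange 1 m 1).filter (fun i => decide (pvOrd cs i ≤ pvOrd cs (i - 1)))).foldl pvSegStep ([], 0))

lemma pvToChars_one : PySem.Int.toChars 1 = ['1'] := by decide

-- the run-lengths list is never empty
lemma pvFold_ne_nil (incs : List Bool) (ls : List Int) (h : ls ≠ []) :
    incs.foldl pvLStep ls ≠ [] := by
  induction incs generalizing ls with
  | nil => exact h
  | cons i t ih => exact ih _ (by simp [pvLStep])

-- ' '.join(parts) + ' ' flattens each part followed by a space (parts nonempty)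
lemma pvJoin_flat (l : List (List Char)) (h : l ≠ []) :
    PySem.Chars.join [' '] l ++ [' '] = l.flatMap (fun x => x ++ [' ']) := by
  induction l with
  | nil => exact absurd rfl h
  | cons x t ih =>
    cases t with
    | nil => simp [PySem.Chars.join_singleton]
    | cons y r =>
      rw [PySem.Chars.join_cons_cons, List.append_assoc, List.append_assoc, ih (by simp)]
      simp

-- A-side invariant: after the first m-1 iterations A's state is exactly
-- (code of cs[m-1], flattened reference labels, last run length)
lemma pvInv (cs : List Char) (m : Int) (h1 : 1 ≤ m) (h2 : m ≤ (cs.length : Int)) :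
    (PySem.List.pyRange 1 m 1).foldl (pvAStep cs)
        ((((PySem.List.pyGet? cs 0).getD ' ').toNat : Int), ['1', ' '], 1)
      = ((((PySem.List.pyGet? cs (m - 1)).getD ' ').toNat : Int),
         (((PySem.List.pyRange 1 m 1).map (pvCmp cs)).foldl pvLStep [1]).flatMap
           (fun n => PySem.Int.toChars n ++ [' ']),
         (PySem.List.pyGet? (((PySem.List.pyRange 1 m 1).map (pvCmp cs)).foldl pvLStep [1]) (-1)).getD 1) := by
  induction m, h1 using Int.le_induction with
  | base =>
    rw [PySem.List.pyRange_one_eq_nil le_rfl]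
    norm_num [pvToChars_one]
    decide
  | succ m hm ih =>
    rw [PySem.List.pyRange_one_succ_right hm, List.foldl_append, List.map_append, List.foldl_append,
      ih (by omega)]
    simp only [List.foldl_cons, List.foldl_nil, List.map_cons, List.map_nil]
    by_cases hc : (((PySem.List.pyGet? cs m).getD ' ').toNat : Int) > (((PySem.List.pyGet? cs (m - 1)).getD ' ').toNat : Int)
    · have hb : pvCmp cs m = true := by simp [pvCmp, hc]
      simp only [pvAStep]
      rw [if_pos hc]
      unfold pvLStep
      rw [hb]
      simp [List.flatMap_append, PySem.List.pyGet?_neg_one_append_singleton, List.append_assoc]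
    · have hb : pvCmp cs m = false := by simp [pvCmp, hc]
      simp only [pvAStep]
      rw [if_neg hc]
      unfold pvLStep
      rw [hb]
      simp [List.flatMap_append, PySem.List.pyGet?_neg_one_append_singleton, pvToChars_one]

lemma pvLStep_true (ls : List Int) :
    pvLStep ls true = ls ++ [((PySem.List.pyGet? ls (-1)).getD 1) + 1] := rfl

lemma pvLStep_false (ls : List Int) : pvLStep ls false = ls ++ [1] := rfl

lemma pvRange_two : PySem.List.pyRange 1 2 1 = [1] := by decide

-- segment-fold invariant: folding the run starts leaves state (P, b) with b the last run
-- start, and completing the current run from b reproduces the reference labels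
lemma pvSeg (cs : List Char) (m : Int) (h1 : 1 ≤ m) :
    (pvStartsFold cs m).1 ++ PySem.List.pyRange 1 (m - (pvStartsFold cs m).2 + 1) 1
        = ((PySem.List.pyRange 1 m 1).map (pvCmp cs)).foldl pvLStep [1]
      ∧ 0 ≤ (pvStartsFold cs m).2 ∧ (pvStartsFold cs m).2 ≤ m - 1 := by
  induction m, h1 using Int.le_induction with
  | base =>
    unfold pvStartsFold
    rw [PySem.List.pyRange_one_eq_nil le_rfl]
    simp only [List.filter_nil, List.foldl_nil, List.map_nil, List.nil_append]
    norm_num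
    rw [show (2 : Int) = 1 + 1 by ring, PySem.List.pyRange_one_singleton]
  | succ m hm ih =>
    obtain ⟨ih1, ih2, ih3⟩ := ih
    have hstep : pvStartsFold cs (m + 1)
        = if pvOrd cs m ≤ pvOrd cs (m - 1) then pvSegStep (pvStartsFold cs m) m
          else pvStartsFold cs m := by
      unfold pvStartsFold
      rw [PySem.List.pyRange_one_succ_right hm, List.filter_append, List.foldl_append]
      by_cases hc : pvOrd cs m ≤ pvOrd cs (m - 1) <;> simp [hc]
    have hFsucc : ((PySem.List.pyRange 1 (m + 1) 1).map (pvCmp cs)).foldl pvLStep [1]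
        = pvLStep (((PySem.List.pyRange 1 m 1).map (pvCmp cs)).foldl pvLStep [1]) (pvCmp cs m) := by
      rw [PySem.List.pyRange_one_succ_right hm, List.map_append, List.foldl_append]
      simp
    by_cases hc : pvOrd cs m ≤ pvOrd cs (m - 1)
    · -- a new run starts at m
      have hb : pvCmp cs m = false := by
        simp only [pvCmp, pvOrd] at hc ⊢
        simp only [decide_eq_false_iff_not]
        omega
      rw [hstep, if_pos hc, hFsucc, hb, pvLStep_false]
      refine ⟨?_, by simp [pvSegStep]; omega, by simp [pvSegStep]⟩
      show ((pvStartsFold cs m).1 ++ PySem.List.pyRange 1 (m - (pvStartsFold cs m).2 + 1) 1)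
            ++ PySem.List.pyRange 1 (m + 1 - m + 1) 1 = _
      rw [ih1, show m + 1 - m + 1 = (2 : Int) by ring, pvRange_two]
    · -- the run continues through m
      have hb : pvCmp cs m = true := by
        simp only [pvCmp, pvOrd] at hc ⊢
        simp only [decide_eq_true_eq]
        omega
      rw [hstep, if_neg hc, hFsucc, hb, pvLStep_true]
      refine ⟨?_, ih2, by omega⟩
      have hmb : (1 : Int) ≤ m - (pvStartsFold cs m).2 := by omega
      have hsplit : PySem.List.pyRange 1 (m - (pvStartsFold cs m).2 + 1) 1
          = PySem.List.pyRange 1 (m - (pvStartsFold cs m).2) 1 ++ [m - (pvStartsFold cs m).2] :=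
        PySem.List.pyRange_one_succ_right hmb
      have hlast : (PySem.List.pyGet?
          (((PySem.List.pyRange 1 m 1).map (pvCmp cs)).foldl pvLStep [1]) (-1)).getD 1
          = m - (pvStartsFold cs m).2 := by
        rw [← ih1, hsplit, ← List.append_assoc, PySem.List.pyGet?_neg_one_append_singleton]
        rfl
      rw [hlast, show m + 1 - (pvStartsFold cs m).2 + 1 = (m - (pvStartsFold cs m).2 + 1) + 1 by ring,
        PySem.List.pyRange_one_succ_right (by omega), ← ih1, hsplit]
      simp [List.append_assoc]

-- the scan's full characterisation: it lands on the first position that is out of range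
-- or not an increase, skipping only in-range increases
lemma pvScanGo_spec (cs : List Char) (n : Int) : ∀ (fuel : Nat) (j : Int), (n - j).toNat ≤ fuel → j ≤ n →
    j ≤ pvScanGo cs n fuel j ∧ pvScanGo cs n fuel j ≤ n
      ∧ (∀ k, j ≤ k → k < pvScanGo cs n fuel j → ¬ pvOrd cs k ≤ pvOrd cs (k - 1))
      ∧ (pvScanGo cs n fuel j < n → pvOrd cs (pvScanGo cs n fuel j) ≤ pvOrd cs (pvScanGo cs n fuel j - 1)) := by
  intro fuel
  induction fuel with
  | zero =>
    intro j ht hj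
    simp only [pvScanGo]
    refine ⟨le_rfl, hj, fun k hk1 hk2 => by omega, fun hlt => by omega⟩
  | succ t ih =>
    intro j ht hj
    simp only [pvScanGo]
    split
    · next h =>
      obtain ⟨g1, g2, g3, g4⟩ := ih (j + 1) (by omega) (by omega)
      refine ⟨by omega, g2, fun k hk1 hk2 => ?_, g4⟩
      by_cases hkj : k = j
      · subst hkj; omega
      · exact g3 k (by omega) hk2
    · next h =>
      refine ⟨le_rfl, hj, fun k hk1 hk2 => by omega, fun hlt => by omega⟩

lemma pvScan_spec (cs : List Char) (n j : Int) (hj : j ≤ n) :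
    j ≤ pvScan cs n j ∧ pvScan cs n j ≤ n
      ∧ (∀ k, j ≤ k → k < pvScan cs n j → ¬ pvOrd cs k ≤ pvOrd cs (k - 1))
      ∧ (pvScan cs n j < n → pvOrd cs (pvScan cs n j) ≤ pvOrd cs (pvScan cs n j - 1)) :=
  pvScanGo_spec cs n (n - j).toNat j le_rfl hj

-- accumulated labels only ever grow by appending: the accumulator is a prefix
lemma pvFold_prefix (L : List Int) : ∀ (P : List Int) (b : Int),
    (L.foldl pvSegStep (P, b)).1 = P ++ (L.foldl pvSegStep ([], b)).1
      ∧ (L.foldl pvSegStep (P, b)).2 = (L.foldl pvSegStep ([], b)).2 := by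
  induction L with
  | nil => intro P b; simp
  | cons e L ih =>
    intro P b
    simp only [List.foldl_cons, pvSegStep, List.nil_append]
    obtain ⟨h1, h2⟩ := ih (P ++ PySem.List.pyRange 1 (e - b + 1) 1) e
    obtain ⟨h3, h4⟩ := ih (PySem.List.pyRange 1 (e - b + 1) 1) e
    exact ⟨by rw [h1, h3, List.append_assoc], by rw [h2, h4]⟩

-- the do-while over runs equals the segment fold over the remaining run starts
lemma pvRuns_eq (cs : List Char) (n : Int) : ∀ (fuel : Nat) (i : Int) (parts : List Int),
    (n - i).toNat ≤ fuel → i < n →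
    pvRunsGo cs n fuel i parts
      = parts ++ ((((PySem.List.pyRange (i + 1) n 1).filter
            (fun k => decide (pvOrd cs k ≤ pvOrd cs (k - 1)))) ++ [n]).foldl pvSegStep ([], i)).1 := by
  intro fuel
  induction fuel with
  | zero => intro i parts ht hi; omega
  | succ t ih =>
    intro i parts ht hi
    simp only [pvRunsGo]
    obtain ⟨g1, g2, g3, g4⟩ := pvScan_spec cs n (i + 1) (by omega)
    set j := pvScan cs n (i + 1) with hj
    have hfilt_lo : (PySem.List.pyRange (i + 1) j 1).filter
        (fun k => decide (pvOrd cs k ≤ pvOrd cs (k - 1))) = [] := by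
      rw [List.filter_eq_nil_iff]
      intro k hk
      rw [PySem.List.mem_pyRange_one] at hk
      simpa using g3 k hk.1 hk.2
    by_cases hend : j ≥ n
    · have hjn : j = n := by omega
      rw [if_pos hend]
      have : PySem.List.pyRange (i + 1) n 1 = PySem.List.pyRange (i + 1) j 1 := by rw [hjn]
      rw [this, hfilt_lo]
      simp only [List.nil_append, List.foldl_cons, List.foldl_nil, pvSegStep]
      rw [hjn]
    · rw [if_neg hend]
      have hsplit : PySem.List.pyRange (i + 1) n 1
          = PySem.List.pyRange (i + 1) j 1 ++ PySem.List.pyRange j n 1 :=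
        PySem.List.pyRange_one_append _ _ _ g1 (by omega)
      have hcons : PySem.List.pyRange j n 1 = j :: PySem.List.pyRange (j + 1) n 1 :=
        PySem.List.pyRange_one_cons (by omega)
      have hpj : decide (pvOrd cs j ≤ pvOrd cs (j - 1)) = true := by
        simpa using g4 (by omega)
      rw [hsplit, List.filter_append, hfilt_lo, List.nil_append, hcons, List.filter_cons,
        hpj, if_pos rfl]
      simp only [List.cons_append, List.foldl_cons]
      have hstep1 : pvSegStep ([], i) j = (PySem.List.pyRange 1 (j - i + 1) 1, j) := by
        simp [pvSegStep]
      rw [hstep1]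
      obtain ⟨hp1, _⟩ := pvFold_prefix
        ((PySem.List.pyRange (j + 1) n 1).filter (fun k => decide (pvOrd cs k ≤ pvOrd cs (k - 1))) ++ [n])
        (PySem.List.pyRange 1 (j - i + 1) 1) j
      rw [hp1, ih j (parts ++ PySem.List.pyRange 1 (j - i + 1) 1) (by omega) (by omega),
        List.append_assoc]

-- ===== VERDICT (by name: the statement is the Claim_ definition above) =====
theorem get_increasing_substring_spec : Claim_equal_get_increasing_substring := by
  intro strlen string _hdom hpre
  obtain ⟨hne, hlen⟩ := hpre
  unfold Spec_get_increasing_substring get_increasing_substring get_increasing_substring_alt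
  by_cases h1 : 1 ≤ strlen
  · -- labelled positions exist: both sides equal the flattened reference labels
    have hruns : pvRunsGo string.toList strlen strlen.toNat 0 []
        = ((((PySem.List.pyRange 1 strlen 1).filter
              (fun k => decide (pvOrd string.toList k ≤ pvOrd string.toList (k - 1)))) ++ [strlen]).foldl
                pvSegStep ([], 0)).1 := by
      have := pvRuns_eq string.toList strlen strlen.toNat 0 [] (by omega) (by omega)
      simpa using this
    obtain ⟨hseg, _, _⟩ := pvSeg string.toList strlen h1
    have hlabels : pvRunsGo string.toList strlen strlen.toNat 0 []
        = ((PySem.List.pyRange 1 strlen 1).map (pvCmp string.toList)).foldl pvLStep [1] := by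
      rw [hruns, List.foldl_append]
      simpa [pvStartsFold, pvSegStep] using hseg
    simp only []
    rw [hlabels, pvInv string.toList strlen h1 hlen]
    set L := ((PySem.List.pyRange 1 strlen 1).map (pvCmp string.toList)).foldl pvLStep [1] with hL
    have hLne : L ≠ [] := pvFold_ne_nil _ _ (by simp)
    have : PySem.Chars.join [' '] (L.map PySem.Int.toChars) ++ [' ']
        = L.flatMap (fun n => PySem.Int.toChars n ++ [' ']) := by
      rw [pvJoin_flat _ (by simpa using hLne), List.flatMap_map]
    rw [this]
  · -- strlen ≤ 0: A's loop is empty and B's single do-while iteration emits the one label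
    simp only []
    rw [PySem.List.pyRange_one_eq_nil (by omega : strlen ≤ 1),
      show strlen.toNat = 0 by omega]
    have hscan : pvScan string.toList strlen (0 + 1) = 1 := by
      unfold pvScan
      rw [show (strlen - (0 + 1)).toNat = 0 by omega]
      rfl
    simp only [pvRunsGo, hscan]
    norm_num [pvRange_two, PySem.Chars.join_singleton, pvToChars_one]
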